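-- pv_equiv track=rewrite | github.com/qiuuuuu622/EasyR1-async | verl/workers/rollout/sglang_rollout_areal.py | _strip_prompt_overlap
-- ===== SOURCE A (Python) =====
-- def _strip_prompt_overlap(output_ids: list[int], prompt_ids: list[int]) -> list[int]:
--     """
--     Defensive fix for SGLang versions where output_ids may contain an overlapping
--     suffix of prompt_ids as a prefix of output_ids.
--     """
--     if not output_ids or not prompt_ids:
--         return output_ids
--
--     max_overlap = min(len(output_ids), len(prompt_ids))
--     for overlap in range(max_overlap, 0, -1):
--         if prompt_ids[-overlap:] == output_ids[:overlap]:
--             return output_ids[overlap:]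
--     return output_ids
-- ===== SOURCE B (Python) =====
-- def _strip_prompt_overlap(output_ids: list[int], prompt_ids: list[int]) -> list[int]:
--     """
--     KMP-based: the longest prompt-suffix that is an output-prefix is the longest
--     border of output_ids + [sep] + prompt_ids (sep a unique sentinel), computed
--     in linear time by the KMP failure function.
--     """
--     sep = object()
--     t = output_ids + [sep] + prompt_ids
--     pi = [0] * len(t)
--     k = 0
--     for i in range(1, len(t)):
--         while k > 0 and t[i] != t[k]:
--             k = pi[k - 1]
--         if t[i] == t[k]:
--             k += 1
--         pi[i] = k
--     return output_ids[pi[-1]:]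
-- ===== Notes on version B (the rewrite author's own statement) =====
-- stated objective: faster
-- what changed: Replaces A's descending O(min(n,m)^2) scan that slice-compares every candidate overlap length by the KMP failure function of output_ids + [sentinel] + prompt_ids, whose last entry is exactly the longest prompt-suffix that prefixes the output.
import Mathlib
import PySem

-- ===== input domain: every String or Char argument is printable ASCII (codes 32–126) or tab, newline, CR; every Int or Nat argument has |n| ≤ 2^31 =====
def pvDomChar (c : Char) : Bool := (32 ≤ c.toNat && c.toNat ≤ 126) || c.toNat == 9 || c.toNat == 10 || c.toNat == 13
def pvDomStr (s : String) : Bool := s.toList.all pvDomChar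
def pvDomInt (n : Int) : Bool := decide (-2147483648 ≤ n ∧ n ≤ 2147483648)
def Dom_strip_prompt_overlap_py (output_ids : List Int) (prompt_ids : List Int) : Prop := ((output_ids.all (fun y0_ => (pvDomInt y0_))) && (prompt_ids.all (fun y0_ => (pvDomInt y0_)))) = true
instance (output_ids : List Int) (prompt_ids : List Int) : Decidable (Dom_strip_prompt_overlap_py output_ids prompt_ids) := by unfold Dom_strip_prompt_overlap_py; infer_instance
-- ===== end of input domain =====

-- B replaces A's descending scan that slice-compares every candidate overlap
-- length by the KMP failure function of output ++ [sentinel] ++ prompt, whose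
-- last entry is the longest prompt-suffix that prefixes the output.

-- ===== PORT A =====
-- 'for overlap in range(max_overlap, 0, -1)' with an early return: recursion
-- counting overlap down from max_overlap to 1; slices via PySem.List.slice.
def stripALoop (output_ids prompt_ids : List Int) : Nat → List Int
  | 0 => output_ids                       -- loop exhausted: 'return output_ids'
  | k + 1 =>                              -- overlap = k + 1
      if PySem.List.slice prompt_ids (some (-((k + 1 : Nat) : Int))) none
           = PySem.List.slice output_ids none (some ((k + 1 : Nat) : Int)) then
        PySem.List.slice output_ids (some ((k + 1 : Nat) : Int)) none
      else stripALoop output_ids prompt_ids k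

def strip_prompt_overlap_py (output_ids : List Int) (prompt_ids : List Int) : List Int :=
  if output_ids = [] ∨ prompt_ids = [] then output_ids
  else stripALoop output_ids prompt_ids (min output_ids.length prompt_ids.length)

-- ===== PORT B =====
-- Source B builds t = output_ids + [sep] + prompt_ids with a fresh sentinel object;
-- ported as List (Option Int) with the sentinel `none` (equal only to itself,
-- like `sep = object()` under Python `==` against ints).
-- 'while k > 0 and t[i] != t[k]: k = pi[k - 1]' — the inner KMP descent;
-- fuel = k bounds the strictly decreasing k, so the port is total.
def kmpDesc (t : List (Option Int)) (pi : List Nat) (c : Option Int) : Nat → Nat → Nat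
  | 0, k => k
  | fuel + 1, k =>
      if 0 < k ∧ ¬ (t.getD k none = c) then kmpDesc t pi c fuel (pi.getD (k - 1) 0)
      else k

-- 'for i in range(1, len(t)): … pi[i] = k' — builds the failure table.
def kmpLoop (t : List (Option Int)) (i : Nat) (pi : List Nat) (k : Nat) : List Nat :=
  if _h : i < t.length then
    let k1 := kmpDesc t pi (t.getD i none) k k
    let k2 := if t.getD k1 none = t.getD i none then k1 + 1 else k1
    kmpLoop t (i + 1) (pi ++ [k2]) k2
  else pi
termination_by t.length - i

def strip_prompt_overlap_py_alt (output_ids : List Int) (prompt_ids : List Int) : List Int :=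
  let t : List (Option Int) := output_ids.map some ++ none :: prompt_ids.map some
  let pi := kmpLoop t 1 [0] 0                 -- pi[0] = 0
  output_ids.drop (pi.getD (t.length - 1) 0)  -- output_ids[pi[-1]:]

-- ===== PRECONDITION & SPEC =====
def Spec_strip_prompt_overlap_py (output_ids : List Int) (prompt_ids : List Int) (out : List Int) : Prop := out = strip_prompt_overlap_py_alt output_ids prompt_ids
instance (output_ids : List Int) (prompt_ids : List Int) (out : List Int) : Decidable (Spec_strip_prompt_overlap_py output_ids prompt_ids out) := by unfold Spec_strip_prompt_overlap_py; infer_instance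

-- ===== CLAIM (what is proved, stated in full; the proofs are below) =====
def Claim_equal_strip_prompt_overlap_py : Prop := ∀ (output_ids : List Int) (prompt_ids : List Int), Dom_strip_prompt_overlap_py output_ids prompt_ids → Spec_strip_prompt_overlap_py output_ids prompt_ids (strip_prompt_overlap_py output_ids prompt_ids)

-- ===== LEMMAS AND PROOFS =====

-- `bordp w k`: k is the length of a proper border of w (prefix = suffix).
def bordp (w : List (Option Int)) (k : Nat) : Bool :=
  decide (k < w.length) && (w.take k == w.drop (w.length - k))

-- length of the longest proper border of w
def bord (w : List (Option Int)) : Nat :=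
  Nat.findGreatest (fun k => bordp w k = true) w.length

lemma bordp_iff {w : List (Option Int)} {k : Nat} :
    bordp w k = true ↔ k < w.length ∧ w.take k = w.drop (w.length - k) := by
  simp [bordp]

lemma bordp_zero {w : List (Option Int)} (h : w ≠ []) : bordp w 0 = true := by
  rw [bordp_iff]
  exact ⟨List.length_pos_iff.mpr h, by simp⟩

lemma bord_isBorder {w : List (Option Int)} (h : w ≠ []) : bordp w (bord w) = true := by
  unfold bord
  exact Nat.findGreatest_spec (P := fun k => bordp w k = true) (Nat.zero_le _) (bordp_zero h)

lemma bord_lt {w : List (Option Int)} (h : w ≠ []) : bord w < w.length :=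
  (bordp_iff.mp (bord_isBorder h)).1

lemma le_bord {w : List (Option Int)} {j : Nat} (hj : bordp w j = true) : j ≤ bord w := by
  unfold bord
  exact Nat.le_findGreatest (Nat.le_of_lt (bordp_iff.mp hj).1) hj

lemma chain_down {w : List (Option Int)} {j k : Nat}
    (hj : bordp w j = true) (hk : bordp w k = true) (hjk : j < k) :
    bordp (w.take k) j = true := by
  obtain ⟨hjl, hje⟩ := bordp_iff.mp hj
  obtain ⟨hkl, hke⟩ := bordp_iff.mp hk
  have hlt : (w.take k).length = k := by rw [List.length_take]; omega
  rw [bordp_iff]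
  refine ⟨by omega, ?_⟩
  rw [List.take_take, min_eq_left (le_of_lt hjk), hje, hlt, hke, List.drop_drop]
  congr 1
  omega

lemma chain_up {w : List (Option Int)} {j k : Nat}
    (hj : bordp (w.take k) j = true) (hk : bordp w k = true) :
    bordp w j = true := by
  obtain ⟨hjl, hje⟩ := bordp_iff.mp hj
  obtain ⟨hkl, hke⟩ := bordp_iff.mp hk
  rw [List.length_take, min_eq_left (le_of_lt hkl)] at hjl hje
  rw [bordp_iff]
  refine ⟨by omega, ?_⟩
  have h1 : w.take j = (w.take k).take j := by
    rw [List.take_take, min_eq_left (le_of_lt hjl)]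
  have hlt : (w.take k).length = k := by rw [List.length_take]; omega
  rw [h1, hje, hke, List.drop_drop]
  congr 1
  omega

-- extension of borders by one character
lemma ext_iff {w : List (Option Int)} {c : Option Int} {j : Nat} :
    bordp (w ++ [c]) (j + 1) = true ↔ bordp w j = true ∧ w.getD j none = c := by
  by_cases hj : j < w.length
  · have hget : w[j]? = some (w.getD j none) := by
      rw [List.getElem?_eq_getElem hj, List.getD_eq_getElem _ _ hj]
    rw [bordp_iff, bordp_iff]
    have hlen : (w ++ [c]).length = w.length + 1 := by simp
    have htake : (w ++ [c]).take (j + 1) = w.take j ++ [w.getD j none] := by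
      rw [List.take_append_of_le_length (by omega), List.take_add_one, hget]
      rfl
    have hdrop : (w ++ [c]).drop ((w ++ [c]).length - (j + 1)) = w.drop (w.length - j) ++ [c] := by
      rw [hlen]
      have : w.length + 1 - (j + 1) = w.length - j := by omega
      rw [this, List.drop_append_of_le_length (by omega)]
    rw [htake, hdrop]
    constructor
    · rintro ⟨-, he⟩
      have hlens : (w.take j).length = (w.drop (w.length - j)).length := by
        simp; omega
      obtain ⟨h1, h2⟩ := List.append_inj he hlens
      exact ⟨⟨hj, h1⟩, by simpa using h2⟩
    · rintro ⟨⟨-, h1⟩, h2⟩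
      exact ⟨by omega, by rw [h1, h2]⟩
  · constructor
    · intro h
      have := (bordp_iff.mp h).1
      simp at this
      omega
    · rintro ⟨h, -⟩
      exact absurd (bordp_iff.mp h).1 hj

-- take of take: prefixes of prefixes are prefixes
lemma take_getD {t : List (Option Int)} {i k : Nat} (hk : k < i) :
    (t.take i).getD k none = t.getD k none := by
  rcases lt_or_ge k t.length with h | h
  · rw [List.getD_eq_getElem?_getD, List.getD_eq_getElem?_getD, List.getElem?_take_of_lt hk]
  · rw [List.getD_eq_getElem?_getD, List.getD_eq_getElem?_getD,
      List.getElem?_eq_none (by simpa [List.length_take] using by omega),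
      List.getElem?_eq_none (by simpa using h)]

-- the KMP inner while-loop: finds the longest border of w = t.take i that is
-- followed by c (or 0)
lemma kmpDesc_spec (t : List (Option Int)) (pi : List Nat) (i : Nat) (c : Option Int)
    (_hi1 : 1 ≤ i) (hiL : i ≤ t.length)
    (hpi : ∀ q, q < i → pi.getD q 0 = bord (t.take (q + 1))) :
    ∀ fuel k, k ≤ fuel → bordp (t.take i) k = true →
      (∀ j, bordp (t.take i) j = true → (t.take i).getD j none = c → j ≤ k) →
      (bordp (t.take i) (kmpDesc t pi c fuel k) = true
        ∧ (∀ j, bordp (t.take i) j = true → (t.take i).getD j none = c →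
            j ≤ kmpDesc t pi c fuel k)
        ∧ (0 < kmpDesc t pi c fuel k →
            (t.take i).getD (kmpDesc t pi c fuel k) none = c)) := by
  have hw : (t.take i).length = i := by rw [List.length_take]; omega
  intro fuel
  induction fuel with
  | zero =>
      intro k hk hb hub
      have hk0 : k = 0 := by omega
      subst hk0
      refine ⟨hb, hub, ?_⟩
      intro h
      simp [kmpDesc] at h
  | succ fuel ih =>
      intro k hk hb hub
      rw [kmpDesc]
      by_cases hc : 0 < k ∧ ¬ (t.getD k none = c)
      · rw [if_pos hc]
        obtain ⟨hkpos, hkne⟩ := hc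
        have hklt : k < i := hw ▸ (bordp_iff.mp hb).1
        have hk1 : k - 1 + 1 = k := by omega
        have hpik : pi.getD (k - 1) 0 = bord (t.take k) := by
          have := hpi (k - 1) (by omega)
          rwa [hk1] at this
        have htk : t.take k = (t.take i).take k := by
          rw [List.take_take, min_eq_left (le_of_lt hklt)]
        have hlk : (t.take k).length = k := by rw [List.length_take]; omega
        have hne : t.take k ≠ [] := by
          intro h
          have h0 : k = 0 := by
            have h1 := hlk
            rw [h] at h1
            simpa using h1.symm
          omega
        have hbk : bordp ((t.take i).take k) (bord (t.take k)) = true := by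
          rw [← htk]; exact bord_isBorder hne
        have hbw : bordp (t.take i) (pi.getD (k - 1) 0) = true := by
          rw [hpik]
          exact chain_up hbk hb
        have hk'lt : pi.getD (k - 1) 0 < k := by
          rw [hpik]
          have h' := bord_lt hne
          rw [hlk] at h'
          exact h' 
        refine ih (pi.getD (k - 1) 0) (by omega) hbw ?_
        intro j hj hjc
        have hjk : j ≤ k := hub j hj hjc
        have hjne : j ≠ k := by
          intro h
          subst h
          rw [take_getD hklt] at hjc
          exact hkne hjc
        have hcd : bordp ((t.take i).take k) j = true := chain_down hj hb (by omega)
        rw [hpik, htk]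
        exact le_bord hcd
      · rw [if_neg hc]
        refine ⟨hb, hub, ?_⟩
        intro h0
        have := not_and.mp hc h0
        have hkc : t.getD k none = c := by
          by_contra hx
          exact this hx
        have hklt : k < i := hw ▸ (bordp_iff.mp hb).1
        rw [take_getD hklt]
        exact hkc

-- one outer-loop step computes the border of the next prefix
lemma kmp_step (t : List (Option Int)) (i : Nat) (pi : List Nat)
    (hi1 : 1 ≤ i) (hiL : i < t.length)
    (hpi : ∀ q, q < i → pi.getD q 0 = bord (t.take (q + 1))) :
    (let c := t.getD i none
     let k1 := kmpDesc t pi c (bord (t.take i)) (bord (t.take i))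
     if t.getD k1 none = c then k1 + 1 else k1) = bord (t.take (i + 1)) := by
  have hw : (t.take i).length = i := by rw [List.length_take]; omega
  have hne : t.take i ≠ [] := by
    intro h
    have := congrArg List.length h
    rw [hw] at this
    simp at this
    omega
  obtain ⟨h1, h2, h3⟩ :=
    kmpDesc_spec t pi i (t.getD i none) hi1 (le_of_lt hiL) hpi (bord (t.take i))
      (bord (t.take i)) le_rfl (bord_isBorder hne) (fun j hj _ => le_bord hj)
  set c := t.getD i none with hcdef
  set k1 := kmpDesc t pi c (bord (t.take i)) (bord (t.take i)) with hk1def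
  have hk1 : k1 < i := hw ▸ (bordp_iff.mp h1).1
  have hgd : t.getD k1 none = (t.take i).getD k1 none := (take_getD hk1).symm
  have htake : t.take (i + 1) = t.take i ++ [c] := by
    have hc' : c = t[i] := by rw [hcdef, List.getD_eq_getElem _ _ hiL]
    rw [List.take_add_one, List.getElem?_eq_getElem hiL, hc']
    simp
  have hlen1 : (t.take i ++ [c]).length = i + 1 := by simp [hw]
  show (if t.getD k1 none = c then k1 + 1 else k1) = bord (t.take (i + 1))
  by_cases hm : t.getD k1 none = c
  · rw [if_pos hm, htake]
    symm
    unfold bord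
    rw [Nat.findGreatest_eq_iff]
    refine ⟨by rw [hlen1]; omega, fun _ => ext_iff.mpr ⟨h1, by rw [← hgd]; exact hm⟩, ?_⟩
    intro n hn hnle hbn
    cases n with
    | zero => omega
    | succ j =>
        obtain ⟨hbj, hjc⟩ := ext_iff.mp hbn
        have := h2 j hbj hjc
        omega
  · rw [if_neg hm, htake]
    have hk10 : k1 = 0 := by
      by_contra h
      exact hm (by rw [hgd]; exact h3 (by omega))
    rw [hk10]
    symm
    unfold bord
    rw [Nat.findGreatest_eq_zero_iff]
    intro n hn0 hnle hbn
    cases n with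
    | zero => omega
    | succ j =>
        obtain ⟨hbj, hjc⟩ := ext_iff.mp hbn
        have hj0 : j = 0 := by have := h2 j hbj hjc; omega
        subst hj0
        exact hm (by rw [hgd, hk10, hjc])

lemma kmpLoop_spec (t : List (Option Int)) :
    ∀ d i pi k, d = t.length - i → 1 ≤ i → i ≤ t.length → pi.length = i →
      (∀ q, q < i → pi.getD q 0 = bord (t.take (q + 1))) →
      k = bord (t.take i) →
      ∀ q, q < t.length → (kmpLoop t i pi k).getD q 0 = bord (t.take (q + 1)) := by
  intro d
  induction d with
  | zero =>
      intro i pi k hd h1 hle hlen hpi hk q hq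
      rw [kmpLoop, dif_neg (by omega)]
      exact hpi q (by omega)
  | succ d ih =>
      intro i pi k hd h1 hle hlen hpi hk q hq
      have hiL : i < t.length := by omega
      subst hk
      rw [kmpLoop, dif_pos hiL]
      have hstep := kmp_step t i pi h1 hiL hpi
      set k1 := kmpDesc t pi (t.getD i none) (bord (t.take i)) (bord (t.take i)) with hk1def
      set k2 := if t.getD k1 none = t.getD i none then k1 + 1 else k1 with hk2def
      have hstep' : k2 = bord (t.take (i + 1)) := hstep
      refine ih (i + 1) (pi ++ [k2]) k2 (by omega) (by omega) (by omega)
        (by simp [hlen]) ?_ hstep' q hq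
      intro q' hq'
      rcases Nat.lt_or_ge q' i with h | h
      · rw [List.getD_eq_getElem?_getD, List.getElem?_append_left (by omega),
          ← List.getD_eq_getElem?_getD]
        exact hpi q' h
      · have hq'i : q' = i := by omega
        subst hq'i
        rw [List.getD_eq_getElem?_getD, List.getElem?_append_right (by omega), hlen]
        simp [hstep']

lemma bord_take_one (t : List (Option Int)) : bord (t.take 1) = 0 := by
  rw [bord, Nat.findGreatest_eq_zero_iff]
  intro n hn hn2 hb
  have := (bordp_iff.mp hb).1
  rw [List.length_take] at this
  omega

-- characterisation of the borders of t = map some o ++ none :: map some p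
lemma bordp_t_iff (o p : List Int) (b : Nat) :
    bordp (o.map some ++ none :: p.map some) b = true ↔
      (b ≤ o.length ∧ b ≤ p.length ∧ p.drop (p.length - b) = o.take b) := by
  have hL : (o.map some ++ none :: p.map some).length = o.length + p.length + 1 := by simp; omega
  have hnone : ∀ j, j < o.length + p.length + 1 →
      ((o.map some ++ none :: p.map some)[j]? = some none ↔ j = o.length) := by
    intro j hj
    rcases lt_trichotomy j o.length with h | h | h
    · rw [List.getElem?_append_left (by simpa using h), List.getElem?_map,
        List.getElem?_eq_getElem h]
      simp
      omega
    · subst h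
      rw [List.getElem?_append_right (by simp)]
      simp
    · rw [List.getElem?_append_right (by simp; omega)]
      have h1 : j - (o.map some).length = (j - o.length - 1) + 1 := by simp; omega
      rw [h1, List.getElem?_cons_succ, List.getElem?_map,
        List.getElem?_eq_getElem (show j - o.length - 1 < p.length by omega)]
      simp
      omega
  have htb : b ≤ o.length →
      (o.map some ++ none :: p.map some).take b = (o.take b).map some := by
    intro hb
    rw [List.take_append_of_le_length (by simpa using hb), List.map_take]
  have hdb : b ≤ p.length →
      (o.map some ++ none :: p.map some).drop ((o.map some ++ none :: p.map some).length - b)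
        = (p.drop (p.length - b)).map some := by
    intro hb
    rw [hL]
    have h1 : o.length + p.length + 1 - b = (o.map some).length + (p.length + 1 - b) := by
      simp
      omega
    have h2 : p.length + 1 - b = (p.length - b) + 1 := by omega
    rw [h1, List.drop_append]
    simp [h2, List.map_drop]
  constructor
  · intro hb
    obtain ⟨hbL, heq⟩ := bordp_iff.mp hb
    rw [hL] at hbL
    have hpt : ∀ j, j < b →
        (o.map some ++ none :: p.map some)[j]?
          = (o.map some ++ none :: p.map some)[(o.map some ++ none :: p.map some).length - b + j]? := by
      intro j hjb
      rw [← List.getElem?_take_of_lt hjb, heq, List.getElem?_drop]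
    have hblo : b ≤ o.length := by
      by_contra h
      push Not at h
      have h0 := hpt o.length h
      rw [(hnone o.length (by omega)).mpr rfl, hL] at h0
      have := (hnone (o.length + p.length + 1 - b + o.length) (by omega)).mp h0.symm
      omega
    have hblp : b ≤ p.length := by
      by_contra h
      push Not at h
      have h0 := hpt (b - p.length - 1) (by omega)
      rw [hL] at h0
      have hidx : o.length + p.length + 1 - b + (b - p.length - 1) = o.length := by omega
      rw [hidx, (hnone o.length (by omega)).mpr rfl] at h0
      have := (hnone (b - p.length - 1) (by omega)).mp h0
      omega
    rw [htb hblo, hdb hblp] at heq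
    exact ⟨hblo, hblp, (List.map_injective_iff.mpr (Option.some_injective Int) heq).symm⟩
  · rintro ⟨hblo, hblp, hpe⟩
    rw [bordp_iff]
    refine ⟨by rw [hL]; omega, ?_⟩
    rw [htb hblo, hdb hblp, hpe]

-- bord t = the largest overlap length A searches for
lemma bord_t_eq (o p : List Int) :
    bord (o.map some ++ none :: p.map some)
      = Nat.findGreatest (fun ov => (p.drop (p.length - ov) == o.take ov) = true)
          (min o.length p.length) := by
  have hQ0 : (p.drop (p.length - 0) == o.take 0) = true := by simp
  have hQm := Nat.findGreatest_spec
    (P := fun ov => (p.drop (p.length - ov) == o.take ov) = true)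
    (Nat.zero_le (min o.length p.length)) hQ0
  have hmle := Nat.findGreatest_le
    (P := fun ov => (p.drop (p.length - ov) == o.take ov) = true)
    (n := min o.length p.length)
  have hL : (o.map some ++ none :: p.map some).length = o.length + p.length + 1 := by simp; omega
  unfold bord
  rw [Nat.findGreatest_eq_iff]
  refine ⟨by omega, fun _ => (bordp_t_iff o p _).mpr ⟨by omega, by omega, by
    simpa using hQm⟩, ?_⟩
  intro n hn hnle hbn
  obtain ⟨h1, h2, h3⟩ := (bordp_t_iff o p n).mp hbn
  have : n ≤ Nat.findGreatest (fun ov => (p.drop (p.length - ov) == o.take ov) = true)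
      (min o.length p.length) :=
    Nat.le_findGreatest (by omega) (by simpa using h3)
  omega

-- A's loop is Nat.findGreatest
lemma stripALoop_eq (o p : List Int) (k : Nat) :
    stripALoop o p k
      = o.drop (Nat.findGreatest
          (fun ov => (p.drop (p.length - ov) == o.take ov) = true) k) := by
  induction k with
  | zero => simp [stripALoop]
  | succ n ih =>
      rw [stripALoop]
      rw [PySem.List.slice_from_neg_natCast p (n + 1) (by omega),
        PySem.List.slice_to_natCast o (n + 1),
        PySem.List.slice_from_natCast o (n + 1)]
      by_cases h : p.drop (p.length - (n + 1)) = o.take (n + 1)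
      · rw [if_pos h, Nat.findGreatest_eq (by simpa using h)]
      · rw [if_neg h, ih, Nat.findGreatest_of_not (by simpa using h)]

-- ===== VERDICT (by name: the statement is the Claim_ definition above) =====
theorem strip_prompt_overlap_py_spec : Claim_equal_strip_prompt_overlap_py := by
  intro o p _
  show strip_prompt_overlap_py o p = strip_prompt_overlap_py_alt o p
  unfold strip_prompt_overlap_py strip_prompt_overlap_py_alt
  have hL : (o.map some ++ none :: p.map some).length = o.length + p.length + 1 := by simp; omega
  have hpi := kmpLoop_spec (o.map some ++ none :: p.map some)
    ((o.map some ++ none :: p.map some).length - 1) 1 [0] 0 rfl le_rfl (by omega)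
    (by simp)
    (by
      intro q hq
      have hq0 : q = 0 := by omega
      subst hq0
      simpa using (bord_take_one (o.map some ++ none :: p.map some)).symm)
    (bord_take_one (o.map some ++ none :: p.map some)).symm
    ((o.map some ++ none :: p.map some).length - 1) (by omega)
  have hlast : (o.map some ++ none :: p.map some).length - 1 + 1
      = (o.map some ++ none :: p.map some).length := by omega
  rw [hlast, List.take_length] at hpi
  show (if o = [] ∨ p = [] then o else stripALoop o p (min o.length p.length))
      = o.drop ((kmpLoop (o.map some ++ none :: p.map some) 1 [0] 0).getD
          ((o.map some ++ none :: p.map some).length - 1) 0)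
  rw [hpi, bord_t_eq]
  by_cases hg : o = [] ∨ p = []
  · rw [if_pos hg]
    rcases hg with h | h
    · subst h
      simp
    · subst h
      simp
  · rw [if_neg hg, stripALoop_eq]
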